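-- pv_equiv track=rewrite | github.com/sdamerdji/pmf | ai_player.py | map_to_string
-- ===== SOURCE A (Python) =====
-- def map_to_string(visible_map, founder_position):
--     """
--     Convert the numeric map to a string representation
--     -1 = unknown/fog of war (?),
--     0 = empty space (.),
--     1 = wall (#),
--     2 = PMF (P),
--     F = Founder's current position
--     """
--     map_symbols = {
--         -1: "?",  # Fog of war / unexplored
--         0: ".",   # Empty space
--         1: "#",   # Wall
--         2: "P"    # PMF
--     }
--
--     founder_x, founder_y = founder_position
--
--     map_rows = []
--     for y, row in enumerate(visible_map):
--         row_chars = []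
--         for x, cell in enumerate(row):
--             # If this is the founder's position, mark it with 'F'
--             if x == founder_x and y == founder_y:
--                 row_chars.append("F")
--             else:
--                 row_chars.append(map_symbols.get(cell, "?"))
--         map_rows.append("".join(row_chars))
--
--     return "\n".join(map_rows)
-- ===== SOURCE B (Python) =====
-- def map_to_string(visible_map, founder_position):
--     founder_x, founder_y = founder_position
--     symbols = "?.#P"
--     s = "\n".join(
--         "".join(symbols[cell + 1] if -1 <= cell <= 2 else "?" for cell in row)
--         for row in visible_map
--     )
--     if 0 <= founder_y < len(visible_map) and 0 <= founder_x < len(visible_map[founder_y]):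
--         pos = founder_x + sum(len(row) + 1 for row in visible_map[:founder_y])
--         s = s[:pos] + "F" + s[pos + 1:]
--     return s
-- ===== Notes on version B (the rewrite author's own statement) =====
-- stated objective: alternative
-- what changed: B renders the grid with no founder logic at all (indexing a fixed symbol string '?.#P' instead of a dict), joins it into one flat string, and then computes the founder's flat character offset arithmetically (founder_x plus the lengths+1 of the preceding rows) and splices a single 'F' into the joined string, instead of A's per-cell coordinate comparison inside nested loops.
import Mathlib
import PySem

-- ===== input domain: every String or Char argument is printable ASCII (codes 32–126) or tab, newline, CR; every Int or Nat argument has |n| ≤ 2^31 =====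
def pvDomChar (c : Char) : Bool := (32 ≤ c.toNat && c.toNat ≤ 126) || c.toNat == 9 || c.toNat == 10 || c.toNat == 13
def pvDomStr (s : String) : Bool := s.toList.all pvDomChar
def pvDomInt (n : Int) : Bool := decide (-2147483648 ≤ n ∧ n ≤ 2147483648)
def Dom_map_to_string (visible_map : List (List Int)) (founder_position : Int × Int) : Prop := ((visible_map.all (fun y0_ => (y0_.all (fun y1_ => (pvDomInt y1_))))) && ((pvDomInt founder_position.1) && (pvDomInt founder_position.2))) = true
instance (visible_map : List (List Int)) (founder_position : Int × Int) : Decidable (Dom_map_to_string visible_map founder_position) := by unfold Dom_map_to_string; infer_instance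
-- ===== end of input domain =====

-- B renders the whole grid with no founder logic (indexing a fixed symbol string), joins it flat,
-- then splices a single 'F' at an arithmetically computed flat offset (objective: alternative).

-- ===== PORT A =====
def map_to_string (visible_map : List (List Int)) (founder_position : Int × Int) : String :=
  let map_symbols : PySem.Dict Int String :=
    PySem.Dict.ofList [(-1, "?"), (0, "."), (1, "#"), (2, "P")]
  let founder_x := founder_position.1
  let founder_y := founder_position.2
  let map_rows : List String :=
    (PySem.List.enumerate visible_map).foldl (fun map_rows yrow =>
      let row_chars : List String :=
        (PySem.List.enumerate yrow.2).foldl (fun row_chars xcell =>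
          if xcell.1 = founder_x ∧ yrow.1 = founder_y then row_chars ++ ["F"]
          else row_chars ++ [map_symbols.getD xcell.2 "?"]) []
      map_rows ++ [PySem.Str.join "" row_chars]) []
  PySem.Str.join "\n" map_rows

-- ===== PORT B =====
def map_to_string_alt (visible_map : List (List Int)) (founder_position : Int × Int) : String :=
  let founder_x := founder_position.1
  let founder_y := founder_position.2
  let symbols : String := "?.#P"
  let s : String :=
    PySem.Str.join "\n" (visible_map.map (fun row =>
      PySem.Str.join "" (row.map (fun cell =>
        if -1 ≤ cell ∧ cell ≤ 2 then
          String.ofList [((PySem.Str.pyGet? symbols (cell + 1)).getD '?')]  -- index always in range under the guard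
        else "?"))))
  if 0 ≤ founder_y ∧ founder_y < (visible_map.length : Int) ∧
     0 ≤ founder_x ∧ founder_x < ((PySem.List.pyGetD visible_map founder_y []).length : Int) then
    let pos : Int := founder_x +
      ((PySem.List.slice visible_map none (some founder_y)).map (fun row => (row.length : Int) + 1)).sum
    PySem.Str.slice s none (some pos) ++ "F" ++ PySem.Str.slice s (some (pos + 1)) none
  else s

-- ===== PRECONDITION & SPEC =====
def Spec_map_to_string (visible_map : List (List Int)) (founder_position : Int × Int) (out : String) : Prop := out = map_to_string_alt visible_map founder_position
instance (visible_map : List (List Int)) (founder_position : Int × Int) (out : String) : Decidable (Spec_map_to_string visible_map founder_position out) := by unfold Spec_map_to_string; infer_instance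

-- ===== CLAIM (what is proved, stated in full; the proofs are below) =====
def Claim_equal_map_to_string : Prop := ∀ (visible_map : List (List Int)) (founder_position : Int × Int), Dom_map_to_string visible_map founder_position → Spec_map_to_string visible_map founder_position (map_to_string visible_map founder_position)

-- ===== LEMMAS AND PROOFS =====

-- A's symbol function (dict lookup with default) and B's (symbol-string indexing), and the
-- single character both produce.
def fA : Int → String := fun cell =>
  (PySem.Dict.ofList [((-1 : Int), "?"), (0, "."), (1, "#"), (2, "P")]).getD cell "?"

def fB : Int → String := fun cell =>
  if -1 ≤ cell ∧ cell ≤ 2 then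
    String.ofList [((PySem.Str.pyGet? "?.#P" (cell + 1)).getD '?')]
  else "?"

def symC : Int → Char := fun cell =>
  if -1 ≤ cell ∧ cell ≤ 2 then ("?.#P".toList.getD (cell + 1).toNat '?') else '?'

lemma fA_eq_fB (c : Int) : fA c = fB c := by
  by_cases h : -1 ≤ c ∧ c ≤ 2
  · have : c = -1 ∨ c = 0 ∨ c = 1 ∨ c = 2 := by omega
    rcases this with rfl | rfl | rfl | rfl <;> decide
  · have e1 : ((-1 : Int) == c) = false := beq_eq_false_iff_ne.mpr (fun he => absurd he.symm (by omega))
    have e2 : ((0 : Int) == c) = false := beq_eq_false_iff_ne.mpr (fun he => absurd he.symm (by omega))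
    have e3 : ((1 : Int) == c) = false := beq_eq_false_iff_ne.mpr (fun he => absurd he.symm (by omega))
    have e4 : ((2 : Int) == c) = false := beq_eq_false_iff_ne.mpr (fun he => absurd he.symm (by omega))
    have hd : PySem.Dict.ofList [((-1 : Int), "?"), (0, "."), (1, "#"), (2, "P")]
        = ⟨[((-1 : Int), "?"), (0, "."), (1, "#"), (2, "P")]⟩ := by decide
    simp only [fB, if_neg h]
    simp [fA, hd, PySem.Dict.getD, PySem.Dict.get?, List.find?, e1, e2, e3, e4]

lemma fB_toList (c : Int) : (fB c).toList = [symC c] := by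
  by_cases h : -1 ≤ c ∧ c ≤ 2
  · have : c = -1 ∨ c = 0 ∨ c = 1 ∨ c = 2 := by omega
    rcases this with rfl | rfl | rfl | rfl <;> decide
  · simp only [fB, symC, if_neg h]; decide

-- A's patched grid of strings: the plain rendering with the founder cell overwritten when in range
-- (guard stated on vm; equals the string-grid guard since map preserves lengths).
def patchedGrid (vm : List (List Int)) (fx fy : Int) : List (List String) :=
  let rows := vm.map (fun row => row.map fA)
  if 0 ≤ fy ∧ fy < (rows.length : Int) ∧ 0 ≤ fx ∧ fx < ((PySem.List.pyGetD rows fy []).length : Int) then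
    PySem.List.pySetD rows fy
      (PySem.List.pySetD (PySem.List.pyGetD rows fy []) fx "F")
  else rows

-- A's inner loop over one row, as a map over enumerate, equals the converted row,
-- patched at founder_x exactly when this is the founder row and founder_x is in range.
lemma rowA_eq (f : Int → String) (fx fy y : Int) (row : List Int) :
    (PySem.List.enumerate row).map
      (fun q => if q.1 = fx ∧ y = fy then "F" else f q.2)
    = if y = fy ∧ 0 ≤ fx ∧ fx < (row.length : Int)
      then (row.map f).set fx.toNat "F"
      else row.map f := by
  apply List.ext_getElem
  · simp [PySem.List.length_enumerate]
    split <;> simp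
  · intro k h1 h2
    have hk : k < row.length := by
      simpa [PySem.List.length_enumerate] using h1
    rw [List.getElem_map, PySem.List.getElem_enumerate]
    by_cases hc : y = fy ∧ 0 ≤ fx ∧ fx < (row.length : Int)
    · simp only [if_pos hc, List.getElem_set]
      by_cases hx : (0 : Int) + (k : Int) = fx
      · have hkx : fx.toNat = k := by omega
        simp [hkx, hx, hc.1]
      · have hkx : ¬ fx.toNat = k := by omega
        simp only [if_neg (fun h => hx h.1 : ¬ ((0 : Int) + (k : Int) = fx ∧ y = fy)), hkx,
          if_false, List.getElem_map]
    · simp only [if_neg hc]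
      have hne : ¬ ((0 : Int) + (k : Int) = fx ∧ y = fy) := by
        intro ⟨ha, hb⟩
        exact hc ⟨hb, by omega, by omega⟩
      simp only [if_neg hne, List.getElem_map]

-- A's whole grid of row-strings equals the patched grid (before joining), row by row.
lemma grid_eq (f : Int → String) (fx fy : Int) (vm : List (List Int)) :
    (PySem.List.enumerate vm).map
      (fun p => (PySem.List.enumerate p.2).map
        (fun q => if q.1 = fx ∧ p.1 = fy then "F" else f q.2))
    = (if 0 ≤ fy ∧ fy < ((vm.map (fun row => row.map f)).length : Int) ∧
          0 ≤ fx ∧ fx < ((PySem.List.pyGetD (vm.map (fun row => row.map f)) fy []).length : Int) then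
        PySem.List.pySetD (vm.map (fun row => row.map f)) fy
          (PySem.List.pySetD (PySem.List.pyGetD (vm.map (fun row => row.map f)) fy []) fx "F")
      else vm.map (fun row => row.map f)) := by
  by_cases hc : 0 ≤ fy ∧ fy < ((vm.map (fun row => row.map f)).length : Int) ∧
      0 ≤ fx ∧ fx < ((PySem.List.pyGetD (vm.map (fun row => row.map f)) fy []).length : Int)
  · obtain ⟨hy0, hylt, hx0, hxlt⟩ := hc
    have hylt' : fy < (vm.length : Int) := by simpa using hylt
    have hget : PySem.List.pyGetD (vm.map (fun row => row.map f)) fy []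
        = vm[fy.toNat].map f := by
      rw [PySem.List.pyGetD_eq_getElem _ _ hy0 (by simpa using hylt')]
      simp
    have hxlt' : fx < (vm[fy.toNat].length : Int) := by
      rw [hget] at hxlt; simpa using hxlt
    rw [if_pos ⟨hy0, hylt, hx0, hxlt⟩, hget,
      PySem.List.pySetD_of_nonneg _ _ hy0, PySem.List.pySetD_of_nonneg _ _ hx0]
    apply List.ext_getElem
    · simp [PySem.List.length_enumerate]
    · intro k h1 h2
      have hk : k < vm.length := by
        simpa [PySem.List.length_enumerate] using h1
      rw [List.getElem_map, PySem.List.getElem_enumerate, rowA_eq, List.getElem_set]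
      by_cases hyk : fy.toNat = k
      · cases hyk
        have hy : (0 : Int) + ((fy.toNat : Nat) : Int) = fy := by omega
        rw [if_pos ⟨hy, hx0, hxlt'⟩]
        simp
      · have hy : ¬ ((0 : Int) + (k : Int) = fy ∧ 0 ≤ fx ∧ fx < ((vm[k].length : Nat) : Int)) := by
          intro h; exact hyk (by omega)
        rw [if_neg hy]
        simp [hyk]
  · rw [if_neg hc]
    apply List.ext_getElem
    · simp [PySem.List.length_enumerate]
    · intro k h1 h2
      have hk : k < vm.length := by
        simpa [PySem.List.length_enumerate] using h1
      rw [List.getElem_map, PySem.List.getElem_enumerate, rowA_eq]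
      have hy : ¬ ((0 : Int) + (k : Int) = fy ∧ 0 ≤ fx ∧ fx < ((vm[k].length : Nat) : Int)) := by
        intro ⟨ha, hb, hcc⟩
        apply hc
        have hfyk : fy.toNat = k := by omega
        have hget : PySem.List.pyGetD (vm.map (fun row => row.map f)) fy []
            = vm[fy.toNat].map f := by
          rw [PySem.List.pyGetD_eq_getElem _ _ (by omega) (by simp; omega)]
          simp
        refine ⟨by omega, by simp; omega, hb, ?_⟩
        rw [hget]
        simp only [List.length_map, hfyk]
        exact hcc
      rw [if_neg hy]
      simp

-- A equals the patched grid, joined.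
lemma A_eq_patched (vm : List (List Int)) (fp : Int × Int) :
    map_to_string vm fp
    = PySem.Str.join "\n" ((patchedGrid vm fp.1 fp.2).map (fun r => PySem.Str.join "" r)) := by
  unfold map_to_string patchedGrid
  have hif : ∀ (fx fy y : Int),
      (fun (row_chars : List String) (xcell : Int × Int) =>
        if xcell.1 = fx ∧ y = fy then row_chars ++ ["F"]
        else row_chars ++ [(PySem.Dict.ofList [((-1 : Int), "?"), (0, "."), (1, "#"), (2, "P")]).getD xcell.2 "?"])
      = (fun row_chars xcell =>
        row_chars ++ [if xcell.1 = fx ∧ y = fy then "F"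
          else (PySem.Dict.ofList [((-1 : Int), "?"), (0, "."), (1, "#"), (2, "P")]).getD xcell.2 "?"]) := by
    intro fx fy y
    funext rc xc
    split <;> rfl
  simp only [hif, PySem.List.foldl_append_singleton_eq_map, List.nil_append]
  have := grid_eq fA fp.1 fp.2 vm
  apply congrArg
  rw [← this, List.map_map]
  rfl

-- joining one rendered row (and its patched form) down to characters
lemma joinRow_toList (row : List Int) :
    (PySem.Str.join "" (row.map fA)).toList = row.map symC := by
  rw [PySem.Str.toList_join]
  have h : (row.map fA).map String.toList = (row.map symC).map (fun c => [c]) := by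
    simp only [List.map_map]
    apply List.map_congr_left
    intro a _
    simp [Function.comp, fA_eq_fB, fB_toList]
  rw [h]
  have : ("" : String).toList = [] := rfl
  rw [this, PySem.Chars.join_nil_singletons]

lemma joinRow_toList_patched (row : List Int) (fxn : Nat) :
    (PySem.Str.join "" ((row.map fA).set fxn "F")).toList = (row.map symC).set fxn 'F' := by
  rw [PySem.Str.toList_join]
  have h : ((row.map fA).set fxn "F").map String.toList
      = ((row.map symC).set fxn 'F').map (fun c => [c]) := by
    rw [List.map_set, List.map_set]
    congr 1
    simp only [List.map_map]
    apply List.map_congr_left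
    intro a _
    simp [Function.comp, fA_eq_fB, fB_toList]
  rw [h]
  have : ("" : String).toList = [] := rfl
  rw [this, PySem.Chars.join_nil_singletons]

lemma joinGrid_toList (rows : List String) :
    (PySem.Str.join "\n" rows).toList = List.intercalate ['\n'] (rows.map String.toList) := by
  rw [PySem.Str.toList_join]
  rfl

lemma intercalate_cons_of_ne (c : List Char) (l : List (List Char)) (h : l ≠ []) :
    List.intercalate ['\n'] (c :: l) = c ++ '\n' :: List.intercalate ['\n'] l := by
  cases l with
  | nil => exact absurd rfl h
  | cons d ds => simp [List.intercalate, List.intersperse]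

-- flat offset of the founder cell is below the joined length
lemma pos_lt_joined (C : List (List Char)) (fyn fxn : Nat) (hy : fyn < C.length)
    (hx : fxn < (C.get ⟨fyn, hy⟩).length) :
    fxn + ((C.take fyn).map (fun r => r.length + 1)).sum < (List.intercalate ['\n'] C).length := by
  induction C generalizing fyn with
  | nil => simp at hy
  | cons c cs ih =>
    cases fyn with
    | zero =>
      simp only [List.take_zero, List.map_nil, List.sum_nil, Nat.add_zero]
      cases cs with
      | nil => simpa [List.intercalate] using hx
      | cons c' cs' =>
        rw [intercalate_cons_of_ne c (c' :: cs') (by simp), List.length_append]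
        simp at hx
        omega
    | succ n =>
      have hy' : n < cs.length := by simpa using hy
      cases cs with
      | nil => simp at hy'
      | cons c' cs' =>
        rw [intercalate_cons_of_ne c (c' :: cs') (by simp), List.length_append]
        have := ih n hy' (by simpa using hx)
        simp only [List.take_succ_cons, List.map_cons, List.sum_cons, List.length_cons]
        omega

-- splicing 'F' at the flat offset equals patching the founder row before joining
lemma set_intercalate (C : List (List Char)) (fyn fxn : Nat) (hy : fyn < C.length)
    (hx : fxn < (C.get ⟨fyn, hy⟩).length) :
    (List.intercalate ['\n'] C).set (fxn + ((C.take fyn).map (fun r => r.length + 1)).sum) 'F'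
    = List.intercalate ['\n'] (C.set fyn ((C.get ⟨fyn, hy⟩).set fxn 'F')) := by
  induction C generalizing fyn with
  | nil => simp at hy
  | cons c cs ih =>
    cases fyn with
    | zero =>
      simp only [List.take_zero, List.map_nil, List.sum_nil, Nat.add_zero, List.get_eq_getElem,
        List.getElem_cons_zero, List.set_cons_zero]
      cases cs with
      | nil => simp [List.intercalate]
      | cons c' cs' =>
        rw [intercalate_cons_of_ne c (c' :: cs') (by simp),
          intercalate_cons_of_ne (c.set fxn 'F') (c' :: cs') (by simp),
          List.set_append, if_pos (by simpa using hx)]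
    | succ n =>
      have hy' : n < cs.length := by simpa using hy
      cases cs with
      | nil => simp at hy'
      | cons c' cs' =>
        have hx' : fxn < ((c' :: cs').get ⟨n, hy'⟩).length := by simpa using hx
        simp only [List.take_succ_cons, List.map_cons, List.sum_cons, List.set_cons_succ,
          List.get_eq_getElem, List.getElem_cons_succ]
        rw [intercalate_cons_of_ne c (c' :: cs') (by simp),
          intercalate_cons_of_ne c ((c' :: cs').set n _) (by
            intro habs
            exact absurd (congrArg List.length habs) (by simp)),
          List.set_append, if_neg (by omega)]
        have hidx : fxn + (c.length + 1 + (((c' :: cs').take n).map (fun r => r.length + 1)).sum)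
            - c.length = (fxn + (((c' :: cs').take n).map (fun r => r.length + 1)).sum) + 1 := by
          omega
        rw [hidx, List.set_cons_succ]
        have := ih n hy' hx'
        simp only [List.get_eq_getElem] at this
        rw [this]

-- the guard on the string grid equals the guard on vm (map preserves all lengths)
lemma pyGetD_rows (vm : List (List Int)) (fy : Int) :
    PySem.List.pyGetD (vm.map (fun row => row.map fA)) fy []
    = (PySem.List.pyGetD vm fy []).map fA := by
  simpa using PySem.List.pyGetD_map (fun row => row.map fA) vm fy []

-- B equals the patched grid, joined.
lemma B_eq_patched (vm : List (List Int)) (fp : Int × Int) :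
    map_to_string_alt vm fp
    = PySem.Str.join "\n" ((patchedGrid vm fp.1 fp.2).map (fun r => PySem.Str.join "" r)) := by
  obtain ⟨fx, fy⟩ := fp
  unfold map_to_string_alt patchedGrid
  simp only []
  have hfb : (fun cell => if -1 ≤ cell ∧ cell ≤ 2 then
      String.ofList [((PySem.Str.pyGet? "?.#P" (cell + 1)).getD '?')] else "?") = fB := rfl
  have hfafb : fB = fA := (funext fA_eq_fB).symm
  rw [hfb, hfafb]
  by_cases hg : 0 ≤ fy ∧ fy < (vm.length : Int) ∧
      0 ≤ fx ∧ fx < ((PySem.List.pyGetD vm fy []).length : Int)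
  · obtain ⟨hy0, hylt, hx0, hxlt⟩ := hg
    have hyn : fy.toNat < vm.length := by omega
    have hgetvm : PySem.List.pyGetD vm fy [] = vm[fy.toNat] :=
      PySem.List.pyGetD_eq_getElem vm [] hy0 hylt
    have hxlt' : fx.toNat < vm[fy.toNat].length := by
      rw [hgetvm] at hxlt; omega
    have hgR : 0 ≤ fy ∧ fy < ((vm.map (fun row => row.map fA)).length : Int) ∧
        0 ≤ fx ∧ fx < ((PySem.List.pyGetD (vm.map (fun row => row.map fA)) fy []).length : Int) := by
      refine ⟨hy0, by simpa using hylt, hx0, ?_⟩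
      rw [pyGetD_rows, List.length_map]
      exact hxlt
    rw [if_pos ⟨hy0, hylt, hx0, hxlt⟩, if_pos hgR]
    -- both sides via toList
    refine String.toList_inj.mp ?_
    -- abbreviations
    set C : List (List Char) := vm.map (fun row => row.map symC) with hC
    have hyC : fy.toNat < C.length := by simpa [hC] using hyn
    have hCget : C.get ⟨fy.toNat, hyC⟩ = vm[fy.toNat].map symC := by simp [hC]
    have hxC : fx.toNat < (C.get ⟨fy.toNat, hyC⟩).length := by
      rw [hCget, List.length_map]; exact hxlt'
    -- the unpatched joined string, as characters
    have hsL : (PySem.Str.join "\n" (vm.map (fun row => PySem.Str.join "" (row.map fA)))).toList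
        = List.intercalate ['\n'] C := by
      rw [joinGrid_toList, List.map_map]
      congr 1
      apply List.map_congr_left
      intro row _
      exact joinRow_toList row
    -- the flat offset, as a natural number
    set SN : Nat := ((C.take fy.toNat).map (fun r => r.length + 1)).sum with hSN
    have hCS : ((C.take fy.toNat).map (fun r => r.length + 1))
        = ((vm.take fy.toNat).map (fun r => r.length + 1)) := by
      rw [hC, ← List.map_take, List.map_map]
      apply List.map_congr_left
      intro row _
      simp
    have hSint : ((PySem.List.slice vm none (some fy)).map (fun row => (row.length : Int) + 1)).sum
        = (SN : Int) := by
      rw [PySem.List.slice_to vm hy0, hSN, hCS, Nat.cast_list_sum, List.map_map]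
      apply congrArg
      apply List.map_congr_left
      intro row _
      rfl
    have hposN : (fx + ((PySem.List.slice vm none (some fy)).map (fun row => (row.length : Int) + 1)).sum).toNat
        = fx.toNat + SN := by rw [hSint]; omega
    have hposN1 : (fx + ((PySem.List.slice vm none (some fy)).map (fun row => (row.length : Int) + 1)).sum + 1).toNat
        = fx.toNat + SN + 1 := by rw [hSint]; omega
    have hpos0 : 0 ≤ fx + ((PySem.List.slice vm none (some fy)).map (fun row => (row.length : Int) + 1)).sum := by
      rw [hSint]; omega
    -- right-hand side: splice = set = patched intercalate
    rw [String.toList_append, String.toList_append, PySem.Str.toList_slice, PySem.Str.toList_slice,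
      PySem.Chars.slice_eq_listSlice, PySem.Chars.slice_eq_listSlice,
      PySem.List.slice_to _ hpos0, PySem.List.slice_from _ (by omega), hsL, hposN, hposN1]
    have hlt := pos_lt_joined C fy.toNat fx.toNat hyC hxC
    have hsplice := List.set_eq_take_cons_drop 'F' (l := List.intercalate ['\n'] C)
      (n := fx.toNat + SN) (by simpa [hSN] using hlt)
    have hFtl : ("F" : String).toList = ['F'] := rfl
    rw [hFtl]
    have hshape : List.take (fx.toNat + SN) (List.intercalate ['\n'] C) ++ ['F'] ++
        List.drop (fx.toNat + SN + 1) (List.intercalate ['\n'] C)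
        = (List.intercalate ['\n'] C).set (fx.toNat + SN) 'F' := by
      rw [hsplice]; simp
    have hpatch := set_intercalate C fy.toNat fx.toNat hyC hxC
    have hR : (PySem.Str.join "\n" (List.map (fun r => PySem.Str.join "" r)
          (PySem.List.pySetD (List.map (fun row => List.map fA row) vm) fy
            (PySem.List.pySetD (PySem.List.pyGetD (List.map (fun row => List.map fA row) vm) fy []) fx "F")))).toList
        = List.intercalate ['\n'] (C.set fy.toNat ((C.get ⟨fy.toNat, hyC⟩).set fx.toNat 'F')) := by
      rw [pyGetD_rows, hgetvm, PySem.List.pySetD_of_nonneg _ _ hx0,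
        PySem.List.pySetD_of_nonneg _ _ hy0, joinGrid_toList, List.map_map, List.map_set]
      have hbase : List.map (String.toList ∘ fun r => PySem.Str.join "" r)
          (List.map (fun row => List.map fA row) vm) = C := by
        rw [List.map_map, hC]
        apply List.map_congr_left
        intro row _
        simpa [Function.comp] using joinRow_toList row
      have helem : (String.toList ∘ fun r => PySem.Str.join "" r) ((List.map fA vm[fy.toNat]).set fx.toNat "F")
          = (C.get ⟨fy.toNat, hyC⟩).set fx.toNat 'F' := by
        rw [hCget]
        simpa [Function.comp] using joinRow_toList_patched vm[fy.toNat] fx.toNat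
      rw [hbase, helem]
    rw [hshape, hR]
    simpa [hSN] using hpatch
  · have hgR : ¬ (0 ≤ fy ∧ fy < ((vm.map (fun row => row.map fA)).length : Int) ∧
        0 ≤ fx ∧ fx < ((PySem.List.pyGetD (vm.map (fun row => row.map fA)) fy []).length : Int)) := by
      rw [pyGetD_rows, List.length_map, List.length_map]
      exact hg
    rw [if_neg hg, if_neg hgR, List.map_map]
    rfl

-- ===== VERDICT (by name: the statement is the Claim_ definition above) =====
theorem map_to_string_spec : Claim_equal_map_to_string := by
  intro vm fp _
  show map_to_string vm fp = map_to_string_alt vm fp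
  rw [A_eq_patched, B_eq_patched]
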